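-- pv_equiv track=rewrite | github.com/JerHutch/obsidian-porter | src/editor_pipeline.py | _clean_whitespace
-- ===== SOURCE A (Python) =====
-- def _clean_whitespace(content: str) -> str:
--     """Clean up whitespace in content"""
--     # Remove trailing whitespace from lines
--     lines = [line.rstrip() for line in content.split('\n')]
--
--     # Remove excessive blank lines (more than 2 consecutive)
--     cleaned_lines = []
--     blank_count = 0
--
--     for line in lines:
--         if not line.strip():
--             blank_count += 1
--             if blank_count <= 2:  # Allow up to 2 blank lines
--                 cleaned_lines.append(line)
--         else:
--             blank_count = 0
--             cleaned_lines.append(line)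
--
--     return '\n'.join(cleaned_lines).strip()
-- ===== SOURCE B (Python) =====
-- def _clean_whitespace(content: str) -> str:
--     """Clean up whitespace in content"""
--     lines = [line.rstrip() for line in content.split('\n')]
--     result = []
--     i = 0
--     n = len(lines)
--     while i < n:
--         if not lines[i].strip():
--             # take the whole run of blank lines at once, keep at most 2
--             j = i
--             while j < n and not lines[j].strip():
--                 j += 1
--             result.extend(lines[i:j][:2])
--             i = j
--         else:
--             result.append(lines[i])
--             i += 1
--     return '\n'.join(result).strip()
-- ===== Notes on version B (the rewrite author's own statement) =====
-- stated objective: alternative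
-- what changed: Replaces the per-line running blank_count fold with a run-based traversal that finds each maximal run of blank lines at once and keeps at most its first two lines.
import Mathlib
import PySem

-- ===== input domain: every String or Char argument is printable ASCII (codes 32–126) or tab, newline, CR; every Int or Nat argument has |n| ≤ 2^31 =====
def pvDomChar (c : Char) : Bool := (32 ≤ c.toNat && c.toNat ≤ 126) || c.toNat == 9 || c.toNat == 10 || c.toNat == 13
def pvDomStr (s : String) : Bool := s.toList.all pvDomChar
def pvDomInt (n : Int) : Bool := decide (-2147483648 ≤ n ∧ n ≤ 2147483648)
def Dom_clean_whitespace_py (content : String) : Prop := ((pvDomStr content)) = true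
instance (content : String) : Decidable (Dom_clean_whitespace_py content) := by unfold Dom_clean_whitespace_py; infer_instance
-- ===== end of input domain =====

-- B replaces A's running blank-line counter with a run-based traversal (find each
-- maximal blank run, keep at most 2 of it); same cost, alternative decomposition.

-- ===== PORT A =====
def clean_whitespace_py (content : String) : String :=
  let lines := ((PySem.Str.split? content "\n").getD []).map PySem.Str.rstrip  -- split? = some …: sep "\n" ≠ ""
  let res := lines.foldl (fun (st : Int × List String) line =>
    if PySem.Str.strip line == "" then
      let bc := st.1 + 1
      if bc ≤ 2 then (bc, st.2 ++ [line]) else (bc, st.2)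
    else (0, st.2 ++ [line])) (0, [])
  PySem.Str.strip (PySem.Str.join "\n" res.2)

-- ===== PORT B =====
def pvBlank (l : String) : Bool := PySem.Str.strip l == ""

def pvGroupClean : List String → List String
  | [] => []
  | l :: rest =>
    if pvBlank l then
      ((l :: rest.takeWhile pvBlank).take 2) ++ pvGroupClean (rest.dropWhile pvBlank)
    else
      l :: pvGroupClean rest
termination_by ls => ls.length
decreasing_by
  · exact Nat.lt_succ_of_le (List.length_dropWhile_le _ _)
  · simp

def clean_whitespace_py_alt (content : String) : String :=
  let lines := ((PySem.Str.split? content "\n").getD []).map PySem.Str.rstrip  -- split? = some …: sep "\n" ≠ ""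
  PySem.Str.strip (PySem.Str.join "\n" (pvGroupClean lines))

-- ===== PRECONDITION & SPEC =====
def Spec_clean_whitespace_py (content : String) (out : String) : Prop := out = clean_whitespace_py_alt content
instance (content : String) (out : String) : Decidable (Spec_clean_whitespace_py content out) := by unfold Spec_clean_whitespace_py; infer_instance

-- ===== CLAIM (what is proved, stated in full; the proofs are below) =====
def Claim_equal_clean_whitespace_py : Prop := ∀ (content : String), Dom_clean_whitespace_py content → Spec_clean_whitespace_py content (clean_whitespace_py content)

-- ===== LEMMAS AND PROOFS =====

-- A's fold, written as a recursion on the line list with the counter as parameter.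
def pvARec (k : Int) : List String → List String
  | [] => []
  | l :: rest =>
    if pvBlank l then
      (if k + 1 ≤ 2 then [l] else []) ++ pvARec (k + 1) rest
    else l :: pvARec 0 rest

theorem pvFoldl_eq_pvARec (lines : List String) : ∀ (k : Int) (acc : List String),
    (lines.foldl (fun (st : Int × List String) line =>
      if PySem.Str.strip line == "" then
        let bc := st.1 + 1
        if bc ≤ 2 then (bc, st.2 ++ [line]) else (bc, st.2)
      else (0, st.2 ++ [line])) (k, acc)).2 = acc ++ pvARec k lines := by
  induction lines with
  | nil => intro k acc; simp [pvARec]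
  | cons l rest ih =>
    intro k acc
    rw [List.foldl_cons]
    by_cases hb : PySem.Str.strip l = ""
    · by_cases h2 : k + 1 ≤ 2
      · have hst : (if (PySem.Str.strip l == "") = true then
            let bc := k + 1
            if bc ≤ 2 then (bc, acc ++ [l]) else (bc, acc)
          else ((0 : Int), acc ++ [l])) = (k + 1, acc ++ [l]) := by simp [hb, h2]
        rw [hst, ih]
        simp [pvARec, pvBlank, hb, h2]
      · have hst : (if (PySem.Str.strip l == "") = true then
            let bc := k + 1
            if bc ≤ 2 then (bc, acc ++ [l]) else (bc, acc)
          else ((0 : Int), acc ++ [l])) = (k + 1, acc) := by simp [hb, h2]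
        rw [hst, ih]
        simp [pvARec, pvBlank, hb, h2]
    · have hst : (if (PySem.Str.strip l == "") = true then
          let bc := k + 1
          if bc ≤ 2 then (bc, acc ++ [l]) else (bc, acc)
        else ((0 : Int), acc ++ [l])) = (0, acc ++ [l]) := by simp [hb]
      rw [hst, ih]
      simp [pvARec, pvBlank, hb]

theorem pvARec_of_pos (rest : List String) : ∀ (k : Int), 1 ≤ k →
    pvARec k rest = (rest.takeWhile pvBlank).take (2 - k).toNat
      ++ pvARec 0 (rest.dropWhile pvBlank) := by
  induction rest with
  | nil => intro k _; simp [pvARec]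
  | cons l rest ih =>
    intro k hk
    by_cases hb : pvBlank l
    · rw [pvARec, if_pos hb, ih (k + 1) (by omega)]
      simp only [List.takeWhile_cons_of_pos hb, List.dropWhile_cons_of_pos hb]
      by_cases h2 : k + 1 ≤ 2
      · have hk1 : k = 1 := by omega
        subst hk1; norm_num
      · have h0 : (2 - (k + 1)).toNat = 0 := by omega
        have h0' : (2 - k).toNat = 0 := by omega
        simp [h2, h0, h0']
    · rw [pvARec, if_neg hb]
      simp only [List.takeWhile_cons_of_neg hb, List.dropWhile_cons_of_neg hb]
      rw [pvARec, if_neg hb]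
      simp

theorem pvGroupClean_eq_pvARec (lines : List String) :
    pvGroupClean lines = pvARec 0 lines := by
  induction lines using pvGroupClean.induct with
  | case1 => simp [pvGroupClean, pvARec]
  | case2 l rest hb ih =>
    rw [pvGroupClean, if_pos hb, pvARec, if_pos hb]
    norm_num [pvARec_of_pos rest 1 le_rfl, ih]
  | case3 l rest hb ih =>
    rw [pvGroupClean, if_neg hb, pvARec, if_neg hb, ih]

-- ===== VERDICT (by name: the statement is the Claim_ definition above) =====
theorem clean_whitespace_py_spec : Claim_equal_clean_whitespace_py := by
  intro content _
  unfold Spec_clean_whitespace_py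
  simp only [clean_whitespace_py, clean_whitespace_py_alt]
  rw [pvFoldl_eq_pvARec, pvGroupClean_eq_pvARec, List.nil_append]
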